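-- pv_equiv track=rewrite | github.com/martafix1/woodCalendarSolver | martinovy_warcrimes/preprocessing.py | get_invalid_offset_table
-- ===== SOURCE A (Python) =====
-- def find_invalid_offsets(anchor_shape, other_shape):
--     invalid_offsets = set()
--     for i in range(len(anchor_shape)):
--         for a, o in zip(anchor_shape[i:], other_shape):
--             if a + o == 2:
--                 invalid_offsets.add(i)
--                 break
--     return invalid_offsets
--
-- def get_invalid_offset_table(unique_variations_flat, intervals ,COLS):
--     table = [[None for _ in unique_variations_flat] for _ in unique_variations_flat]
--     interval_index = 0
--
--     for asi, anchor_shape in enumerate(unique_variations_flat):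
--         interval = intervals[interval_index]
--
--         for osi, offset_shape in enumerate(unique_variations_flat):
--             if osi >= interval[0] and osi < interval[1]:
--                 continue
--             table[asi][osi] = find_invalid_offsets(anchor_shape, offset_shape)
--
--         if asi + 1 >= interval[1]:
--             interval_index += 1
--
--     return table
-- ===== SOURCE B (Python) =====
-- def get_invalid_offset_table(unique_variations_flat, intervals, COLS):
--     # For every variation, group its positions by value once; each cell is then
--     # computed by scattering pair-matches (anchor[p]+other[q]==2, q<=p) into a
--     # flag array and collecting the flagged offsets in ascending order.
--     pos_by_val = []
--     for shape in unique_variations_flat: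
--         d = {}
--         for q, v in enumerate(shape):
--             d.setdefault(v, []).append(q)
--         pos_by_val.append(d)
--
--     table = []
--     interval_index = 0
--     for asi, anchor in enumerate(unique_variations_flat):
--         lo, hi = intervals[interval_index]
--         row = []
--         for osi in range(len(unique_variations_flat)):
--             if lo <= osi < hi:
--                 row.append(None)
--                 continue
--             d = pos_by_val[osi]
--             la = len(anchor)
--             mark = [False] * la
--             for p, a in enumerate(anchor):
--                 for q in d.get(2 - a, ()):
--                     if q > p:
--                         break
--                     mark[p - q] = True
--             row.append({i for i in range(la) if mark[i]})
--         table.append(row)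
--         if asi + 1 >= hi:
--             interval_index += 1
--     return table
-- ===== Notes on version B (the rewrite author's own statement) =====
-- stated objective: faster
-- what changed: Instead of sliding each offset window and rescanning it for a pair summing to 2, B groups every variation's positions by value once, scatters the matching (p,q) pairs (anchor[p]+other[q]==2, q<=p) found by dictionary lookup into a flag array, and collects the flagged offsets ascending; the interval-skipping walk is kept.
import Mathlib
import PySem

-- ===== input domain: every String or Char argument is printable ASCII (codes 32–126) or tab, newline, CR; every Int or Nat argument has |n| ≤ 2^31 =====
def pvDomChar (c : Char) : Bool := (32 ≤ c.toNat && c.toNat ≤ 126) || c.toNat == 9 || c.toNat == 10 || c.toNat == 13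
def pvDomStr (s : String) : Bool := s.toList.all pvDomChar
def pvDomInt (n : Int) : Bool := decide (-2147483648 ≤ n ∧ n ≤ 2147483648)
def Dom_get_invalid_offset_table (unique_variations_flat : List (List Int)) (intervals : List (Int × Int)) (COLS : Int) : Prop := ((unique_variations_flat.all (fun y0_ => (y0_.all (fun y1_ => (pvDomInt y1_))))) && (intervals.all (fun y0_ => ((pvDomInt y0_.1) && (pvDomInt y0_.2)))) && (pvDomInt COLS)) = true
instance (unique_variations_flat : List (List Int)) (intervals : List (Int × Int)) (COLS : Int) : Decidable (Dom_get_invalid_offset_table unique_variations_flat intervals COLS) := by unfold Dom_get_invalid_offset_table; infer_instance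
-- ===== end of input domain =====

-- B replaces A's per-offset window rescans by one positions-by-value dictionary per
-- variation plus a scatter into a flag array (objective: faster pair computation).

-- ===== PORT A =====
-- anchor_shape[i:] with i ≥ 0 (i from range) is List.drop i; the inner loop
-- breaks at the first pair with a + o == 2, i.e. adds i iff some zipped pair sums to 2.
def find_invalid_offsets (anchor_shape other_shape : List Int) : List Int :=
  (List.range anchor_shape.length).foldl
    (fun s i =>
      if ((anchor_shape.drop i).zip other_shape).any (fun ao => ao.1 + ao.2 == 2)
      then PySem.Set.add s (i : Int) else s)
    []

def gioRowA (uv : List (List Int)) (lo hi : Int) (anchor : List Int) :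
    List (Option (List Int)) :=
  (PySem.List.enumerate uv 0).map (fun ov =>
    if decide (lo ≤ ov.1) && decide (ov.1 < hi) then none
    else some (find_invalid_offsets anchor ov.2))

-- the for-loop over enumerate(unique_variations_flat) carrying interval_index;
-- Python raises IndexError at intervals[interval_index] where pyGet? is none (outside Pre_).
def gioLoopA (uv : List (List Int)) (intervals : List (Int × Int)) :
    List (List Int) → Int → Int → List (List (Option (List Int)))
  | [], _, _ => []
  | anchor :: rest, asi, ii =>
    match PySem.List.pyGet? intervals ii with
    | none => []
    | some iv =>
      gioRowA uv iv.1 iv.2 anchor ::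
        gioLoopA uv intervals rest (asi + 1) (if asi + 1 ≥ iv.2 then ii + 1 else ii)

def get_invalid_offset_table (unique_variations_flat : List (List Int)) (intervals : List (Int × Int)) (COLS : Int) : List (List (Option (List Int))) :=
  gioLoopA unique_variations_flat intervals unique_variations_flat 0 0

-- ===== PORT B =====
-- d.setdefault(v, []).append(q) over enumerate(shape)
def gioPosByVal (shape : List Int) : PySem.Dict Int (List Int) :=
  (PySem.List.enumerate shape 0).foldl
    (fun d qv => d.modify qv.2 [] (fun l => l ++ [qv.1])) PySem.Dict.empty

-- the scatter loop: 'for p, a in enumerate(anchor): for q in d.get(2-a, ()): if q > p: break; mark[p-q] = True'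
def gioMark (anchor : List Int) (d : PySem.Dict Int (List Int)) : List Bool :=
  (PySem.List.enumerate anchor 0).foldl
    (fun m pa =>
      ((d.getD (2 - pa.2) []).takeWhile (fun q => decide (q ≤ pa.1))).foldl
        (fun m q => PySem.List.pySetD m (pa.1 - q) true) m)
    (List.replicate anchor.length false)

-- {i for i in range(la) if mark[i]}
def gioCellB (anchor : List Int) (d : PySem.Dict Int (List Int)) : List Int :=
  PySem.Set.ofList
    ((PySem.List.pyRange 0 anchor.length 1).filter
      (fun i => PySem.List.pyGetD (gioMark anchor d) i false))

def gioLoopB (pds : List (PySem.Dict Int (List Int))) (intervals : List (Int × Int)) :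
    List (List Int) → Int → Int → List (List (Option (List Int)))
  | [], _, _ => []
  | anchor :: rest, asi, ii =>
    match PySem.List.pyGet? intervals ii with
    | none => []
    | some iv =>
      ((PySem.List.enumerate pds 0).map (fun od =>
          if decide (iv.1 ≤ od.1) && decide (od.1 < iv.2) then none
          else some (gioCellB anchor od.2))) ::
        gioLoopB pds intervals rest (asi + 1) (if asi + 1 ≥ iv.2 then ii + 1 else ii)

def get_invalid_offset_table_alt (unique_variations_flat : List (List Int)) (intervals : List (Int × Int)) (COLS : Int) : List (List (Option (List Int))) :=
  gioLoopB (unique_variations_flat.map gioPosByVal) intervals unique_variations_flat 0 0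

-- ===== PRECONDITION & SPEC =====
-- Pre_ excludes exactly the inputs where Python's intervals[interval_index] raises
-- IndexError; it mirrors only the interval_index bookkeeping (which intervals entry is
-- read at each step), not the table computation.
def gioWalkOK (intervals : List (Int × Int)) : Nat → Int → Int → Bool
  | 0, _, _ => true
  | n + 1, asi, ii =>
    match PySem.List.pyGet? intervals ii with
    | none => false
    | some iv => gioWalkOK intervals n (asi + 1) (if asi + 1 ≥ iv.2 then ii + 1 else ii)

def Pre_get_invalid_offset_table (unique_variations_flat : List (List Int)) (intervals : List (Int × Int)) (COLS : Int) : Prop :=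
  gioWalkOK intervals unique_variations_flat.length 0 0 = true

instance (unique_variations_flat : List (List Int)) (intervals : List (Int × Int)) (COLS : Int) : Decidable (Pre_get_invalid_offset_table unique_variations_flat intervals COLS) := by unfold Pre_get_invalid_offset_table; infer_instance

def pvWitness_get_invalid_offset_table : List (List Int) × (List (Int × Int)) × Int :=
  ([[1, 0], [0, 1]], [(0, 1), (1, 2)], 7)

def Spec_get_invalid_offset_table (unique_variations_flat : List (List Int)) (intervals : List (Int × Int)) (COLS : Int) (out : List (List (Option (List Int)))) : Prop := out = get_invalid_offset_table_alt unique_variations_flat intervals COLS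
instance (unique_variations_flat : List (List Int)) (intervals : List (Int × Int)) (COLS : Int) (out : List (List (Option (List Int)))) : Decidable (Spec_get_invalid_offset_table unique_variations_flat intervals COLS out) := by unfold Spec_get_invalid_offset_table; infer_instance

-- ===== CLAIM (what is proved, stated in full; the proofs are below) =====
def Claim_equal_get_invalid_offset_table : Prop := ∀ (unique_variations_flat : List (List Int)) (intervals : List (Int × Int)) (COLS : Int), Dom_get_invalid_offset_table unique_variations_flat intervals COLS → Pre_get_invalid_offset_table unique_variations_flat intervals COLS → Spec_get_invalid_offset_table unique_variations_flat intervals COLS (get_invalid_offset_table unique_variations_flat intervals COLS)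

-- ===== LEMMAS AND PROOFS =====


-- A's set-building loop over range(la) adds ascending distinct offsets: it is the
-- foldl of Set.add over the filtered, cast range
lemma gio_foldl_ite_add (P : Nat → Bool) :
    ∀ (xs : List Nat) (s : PySem.Set Int),
      xs.foldl (fun s i => if P i then PySem.Set.add s (i : Int) else s) s
        = (List.map (fun (i : Nat) => (i : Int)) (xs.filter P)).foldl PySem.Set.add s := by
  intro xs
  induction xs with
  | nil => intro s; rfl
  | cons x xs ih =>
    intro s
    by_cases h : P x <;> simp [h, ih]

lemma gio_A_closed (anchor other : List Int) :
    find_invalid_offsets anchor other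
      = PySem.Set.ofList
          (List.map (fun (i : Nat) => (i : Int))
            ((List.range anchor.length).filter
              (fun i => ((anchor.drop i).zip other).any (fun ao => ao.1 + ao.2 == 2)))) := by
  unfold find_invalid_offsets
  rw [gio_foldl_ite_add, PySem.Set.ofList_eq_foldl]

-- the positions-by-value dictionary: entry v is the index list of occurrences of v
lemma gio_posfold (l : List (Int × Int)) :
    ∀ (d : PySem.Dict Int (List Int)) (v : Int),
      (l.foldl (fun d qv => d.modify qv.2 [] (fun s => s ++ [qv.1])) d).getD v []
        = d.getD v [] ++ (l.filter (fun qv => qv.2 == v)).map (·.1) := by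
  induction l with
  | nil => intro d v; simp
  | cons qv l ih =>
    intro d v
    simp only [List.foldl_cons]
    rw [ih, PySem.Dict.getD_modify]
    by_cases h : v = qv.2
    · simp [h, List.append_assoc]
    · simp only [h, if_false]
      simp [Ne.symm h]

lemma gio_pos_getD (other : List Int) (v : Int) :
    (gioPosByVal other).getD v []
      = ((PySem.List.enumerate other 0).filter (fun qv => qv.2 == v)).map (·.1) := by
  unfold gioPosByVal
  rw [gio_posfold]
  simp

lemma gio_pos_pairwise (other : List Int) (v : Int) :
    (((PySem.List.enumerate other 0).filter (fun qv => qv.2 == v)).map (·.1)).Pairwise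
      (fun a b => a < b) := by
  exact List.Pairwise.map _ (fun a b hab => hab)
    ((PySem.List.pairwise_lt_enumerate other 0).filter _)

lemma gio_pos_mem (other : List Int) (v q : Int) :
    (q ∈ ((PySem.List.enumerate other 0).filter (fun qv => qv.2 == v)).map (·.1))
      ↔ ∃ k : Nat, ∃ h : k < other.length, q = (k : Int) ∧ other[k] = v := by
  simp only [List.mem_map, List.mem_filter, PySem.List.mem_enumerate_iff]
  constructor
  · rintro ⟨pa, ⟨⟨k, hk, rfl⟩, hv⟩, rfl⟩
    refine ⟨k, hk, by simp, by simpa using hv⟩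
  · rintro ⟨k, hk, rfl, hv⟩
    exact ⟨(0 + (k : Int), other[k]), ⟨⟨k, hk, rfl⟩, by simpa using hv⟩, by ring⟩

-- on a strictly increasing list, the break at the first q > p keeps exactly the q ≤ p
lemma gio_takeWhile_eq_filter (p : Int) :
    ∀ (l : List Int), l.Pairwise (fun a b => a < b) →
      l.takeWhile (fun q => decide (q ≤ p)) = l.filter (fun q => decide (q ≤ p)) := by
  intro l
  induction l with
  | nil => intro _; rfl
  | cons a l ih =>
    intro hp
    rw [List.pairwise_cons] at hp
    by_cases h : a ≤ p
    · simp [h, ih hp.2]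
    · simp only [List.takeWhile_cons, List.filter_cons, h,
        decide_false]
      symm
      simp only [Bool.false_eq_true, if_false]
      rw [List.filter_eq_nil_iff]
      intro x hx
      have := hp.1 x hx
      simp only [decide_eq_true_eq]
      omega

-- scatter: marking cells true and reading one back
lemma gio_scatter1 (c : Int) :
    ∀ (idxs : List Int) (m : List Bool) (j : Nat), j < m.length →
      (∀ q ∈ idxs, 0 ≤ c - q) →
      ((idxs.foldl (fun m q => PySem.List.pySetD m (c - q) true) m).getD j false)
        = (m.getD j false || idxs.any (fun q => c - q == (j : Int))) := by
  intro idxs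
  induction idxs with
  | nil => intro m j hj _; simp
  | cons q idxs ih =>
    intro m j hj hnn
    simp only [List.foldl_cons, List.any_cons]
    rw [ih _ j (by rw [PySem.List.length_pySetD]; exact hj)
        (fun q hq => hnn q (List.mem_cons_of_mem _ hq))]
    rw [PySem.List.pySetD_of_nonneg _ _ (hnn q (List.mem_cons_self))]
    by_cases h : c - q = (j : Int)
    · have ht : (c - q).toNat = j := by omega
      simp [h, List.getD_eq_getElem?_getD, hj]
    · have hne : (c - q).toNat ≠ j := by
        intro he
        have := hnn q (List.mem_cons_self)
        omega
      have hb : (c - q == (j : Int)) = false := by simp [h]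
      simp [List.getD_eq_getElem?_getD, hne, hb]

lemma gio_scatter1_len (c : Int) (idxs : List Int) :
    ∀ m : List Bool,
      (idxs.foldl (fun m q => PySem.List.pySetD m (c - q) true) m).length = m.length := by
  induction idxs with
  | nil => intro m; rfl
  | cons q idxs ih => intro m; rw [List.foldl_cons, ih, PySem.List.length_pySetD]

lemma gio_scatter (g : Int × Int → List Int)
    (hg : ∀ pa q, q ∈ g pa → 0 ≤ pa.1 - q) :
    ∀ (l : List (Int × Int)) (m : List Bool) (j : Nat), j < m.length →
      ((l.foldl (fun m pa =>
          (g pa).foldl (fun m q => PySem.List.pySetD m (pa.1 - q) true) m) m).getD j false)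
        = (m.getD j false
            || l.any (fun pa => (g pa).any (fun q => pa.1 - q == (j : Int)))) := by
  intro l
  induction l with
  | nil => intro m j hj; simp
  | cons pa l ih =>
    intro l_m j hj
    simp only [List.foldl_cons, List.any_cons]
    rw [ih _ j (by rw [gio_scatter1_len]; exact hj),
      gio_scatter1 pa.1 _ l_m j hj (fun q hq => hg pa q hq), Bool.or_assoc]

lemma gio_mark_getD (anchor : List Int) (d : PySem.Dict Int (List Int)) (i : Nat)
    (hi : i < anchor.length) :
    PySem.List.pyGetD (gioMark anchor d) (i : Int) false
      = (PySem.List.enumerate anchor 0).any (fun pa =>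
          ((d.getD (2 - pa.2) []).takeWhile (fun q => decide (q ≤ pa.1))).any
            (fun q => pa.1 - q == (i : Int))) := by
  unfold gioMark
  rw [PySem.List.pyGetD_natCast]
  rw [gio_scatter _
      (fun pa q hq => by
        have := List.mem_takeWhile_imp hq
        simp only [decide_eq_true_eq] at this
        omega)
      _ _ i (by simpa using hi)]
  simp [List.getD_eq_getElem?_getD, hi]

-- the two per-offset predicates coincide
lemma gio_pred_eq (anchor other : List Int) (i : Nat) (hi : i < anchor.length) :
    PySem.List.pyGetD (gioMark anchor (gioPosByVal other)) (i : Int) false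
      = ((anchor.drop i).zip other).any (fun ao => ao.1 + ao.2 == 2) := by
  rw [gio_mark_getD anchor _ i hi, Bool.eq_iff_iff]
  simp only [List.any_eq_true]
  constructor
  · rintro ⟨pa, hpa, q, hq, hqi⟩
    rw [PySem.List.mem_enumerate_iff] at hpa
    obtain ⟨p, hp, rfl⟩ := hpa
    simp only [zero_add] at hq hqi ⊢
    rw [gio_pos_getD, gio_takeWhile_eq_filter _ _ (gio_pos_pairwise other _),
      List.mem_filter] at hq
    obtain ⟨hqmem, hqle⟩ := hq
    rw [gio_pos_mem] at hqmem
    obtain ⟨k, hk, rfl, hvk⟩ := hqmem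
    simp only [decide_eq_true_eq] at hqle
    simp only [beq_iff_eq] at hqi
    -- witness index in the zip: j = k, position p = i + k
    have hpk : p = i + k := by omega
    refine ⟨(anchor[p], other[k]), ?_, ?_⟩
    · rw [List.mem_iff_getElem]
      refine ⟨k, ?_, ?_⟩
      · simp [List.length_zip, List.length_drop]; omega
      · rw [List.getElem_zip]
        congr 1
        · rw [List.getElem_drop]; congr 1; omega
    · simp only [beq_iff_eq]
      rw [hvk]; ring
  · rintro ⟨ao, hao, hsum⟩
    rw [List.mem_iff_getElem] at hao
    obtain ⟨j, hj, rfl⟩ := hao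
    simp only [List.length_zip, List.length_drop] at hj
    have hj1 : i + j < anchor.length := by omega
    have hj2 : j < other.length := by omega
    refine ⟨((i + j : Nat), anchor[i + j]), ?_, ?_⟩
    · rw [PySem.List.mem_enumerate_iff]
      exact ⟨i + j, hj1, by simp⟩
    · refine ⟨(j : Int), ?_, ?_⟩
      · rw [gio_pos_getD, gio_takeWhile_eq_filter _ _ (gio_pos_pairwise other _),
          List.mem_filter]
        constructor
        · rw [gio_pos_mem]
          refine ⟨j, hj2, rfl, ?_⟩
          rw [List.getElem_zip] at hsum
          simp only [beq_iff_eq, List.getElem_drop] at hsum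
          omega
        · simp only [decide_eq_true_eq]; push_cast; omega
      · simp only [beq_iff_eq]; push_cast; ring

-- the per-cell equality: A's window scan equals B's scatter-and-collect
lemma gio_cell_eq (anchor other : List Int) :
    find_invalid_offsets anchor other = gioCellB anchor (gioPosByVal other) := by
  rw [gio_A_closed]
  unfold gioCellB
  rw [PySem.List.pyRange_zero_natCast, List.filter_map]
  have hfc : ((List.range anchor.length).filter
        ((fun i => PySem.List.pyGetD (gioMark anchor (gioPosByVal other)) i false) ∘
          fun k => ((k : Nat) : Int)))
      = (List.range anchor.length).filter
          (fun i => ((anchor.drop i).zip other).any (fun ao => ao.1 + ao.2 == 2)) := by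
    apply List.filter_congr
    intro i hi
    simp only [Function.comp]
    exact gio_pred_eq anchor other i (List.mem_range.mp hi)
  rw [hfc]

lemma gio_enumerate_map {α β : Type} (f : α → β) (xs : List α) (s : Int) :
    PySem.List.enumerate (xs.map f) s
      = (PySem.List.enumerate xs s).map (fun p => (p.1, f p.2)) := by
  induction xs generalizing s with
  | nil => simp [PySem.List.enumerate_nil]
  | cons x xs ih => simp [PySem.List.enumerate_cons, ih]

lemma gio_row_eq (uv : List (List Int)) (lo hi : Int) (anchor : List Int) :
    gioRowA uv lo hi anchor
      = (PySem.List.enumerate (uv.map gioPosByVal) 0).map (fun od =>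
          if decide (lo ≤ od.1) && decide (od.1 < hi) then none
          else some (gioCellB anchor od.2)) := by
  rw [gio_enumerate_map, List.map_map]
  unfold gioRowA
  apply List.map_congr_left
  intro p _
  simp only [Function.comp]
  rw [gio_cell_eq]

lemma gio_loop_eq (uv : List (List Int)) (intervals : List (Int × Int)) :
    ∀ (rest : List (List Int)) (asi ii : Int),
      gioLoopA uv intervals rest asi ii
        = gioLoopB (uv.map gioPosByVal) intervals rest asi ii := by
  intro rest
  induction rest with
  | nil => intro asi ii; rfl
  | cons anchor rest ih =>
    intro asi ii
    unfold gioLoopA gioLoopB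
    cases PySem.List.pyGet? intervals ii with
    | none => rfl
    | some iv => simp only []; rw [gio_row_eq, ih]

-- ===== VERDICT (by name: the statement is the Claim_ definition above) =====
theorem get_invalid_offset_table_spec : Claim_equal_get_invalid_offset_table := by
  intro uv intervals COLS _ _
  unfold Spec_get_invalid_offset_table get_invalid_offset_table get_invalid_offset_table_alt
  exact gio_loop_eq uv intervals uv 0 0
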